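-- pv_equiv track=rewrite | github.com/roblass/advent_of_code | 2023/01/two.py | find_text_numbers
-- ===== SOURCE A (Python) =====
-- numbers = {'one': 1, 'two': 2, 'three': 3, 'four': 4, 'five': 5, 'six': 6, 'seven': 7, 'eight': 8,
--            'nine': 9}
--
-- def find_text_numbers(line):
--     text_numbers = []
--     for s_num, i_num in numbers.items():
--         index = line.find(s_num)
--         while index >= 0:
--             text_numbers.append((index, len(s_num), i_num))
--             index = line.find(s_num, index+1)
--     return text_numbers
-- ===== SOURCE B (Python) =====
-- numbers = {'one': 1, 'two': 2, 'three': 3, 'four': 4, 'five': 5, 'six': 6, 'seven': 7, 'eight': 8,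
--            'nine': 9}
--
-- def find_text_numbers(line):
--     # one left-to-right scan of the line; matches are bucketed per word,
--     # then the buckets are concatenated in `numbers` order
--     buckets = {w: [] for w in numbers}
--     for i in range(len(line)):
--         for w in numbers:
--             if line.startswith(w, i):
--                 buckets[w].append((i, len(w), numbers[w]))
--     return [t for w in numbers for t in buckets[w]]
-- ===== Notes on version B (the rewrite author's own statement) =====
-- stated objective: alternative
-- what changed: Replaces the per-word repeated str.find while-loops with a single left-to-right index scan that tests startswith at each position and buckets matches per word in a dict, concatenating the buckets in numbers order at the end.
import Mathlib
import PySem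

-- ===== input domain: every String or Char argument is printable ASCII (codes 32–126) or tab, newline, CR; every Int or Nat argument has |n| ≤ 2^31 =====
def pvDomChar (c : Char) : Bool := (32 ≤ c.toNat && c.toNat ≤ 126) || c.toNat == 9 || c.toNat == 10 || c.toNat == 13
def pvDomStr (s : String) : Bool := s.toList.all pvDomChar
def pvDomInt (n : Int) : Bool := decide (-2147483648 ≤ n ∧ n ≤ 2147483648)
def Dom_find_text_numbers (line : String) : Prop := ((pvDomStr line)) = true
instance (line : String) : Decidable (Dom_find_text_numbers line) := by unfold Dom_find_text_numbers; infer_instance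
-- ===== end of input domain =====

-- B replaces A's per-word repeated str.find loops by a single left-to-right position scan
-- bucketing matches per word (alternative decomposition, same asymptotic cost).


-- the module-level dict `numbers` as an association list (insertion order)
def pvNumbers : List (List Char × Int) :=
  [("one".toList, 1), ("two".toList, 2), ("three".toList, 3), ("four".toList, 4),
   ("five".toList, 5), ("six".toList, 6), ("seven".toList, 7), ("eight".toList, 8),
   ("nine".toList, 9)]

-- ===== PORT A =====
-- A's `while index >= 0` loop; fuel s.length + 1 always suffices because each
-- index returned by find(s_num, index+1) is strictly larger than the previous one
def pvLoopA (s w : List Char) (v : Int) : Nat → Int → List (Int × Int × Int)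
  | 0, _ => []
  | fuel + 1, idx =>
    if idx ≥ 0 then
      (idx, (w.length : Int), v) :: pvLoopA s w v fuel (PySem.Chars.findFrom s w (idx + 1))
    else []

def find_text_numbers (line : String) : List (Int × Int × Int) :=
  pvNumbers.foldl
    (fun acc p =>
      acc ++ pvLoopA line.toList p.1 p.2 (line.toList.length + 1) (PySem.Chars.find line.toList p.1))
    []

-- ===== PORT B =====
-- Python's line.startswith(w, i) for an index 0 ≤ i ≤ len(line) is exactly
-- `PySem.Chars.startswith (s.drop i.toNat) w` (i ranges over range(len(line)) here)
def find_text_numbers_alt (line : String) : List (Int × Int × Int) :=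
  let s := line.toList
  let d0 : PySem.Dict (List Char) (List (Int × Int × Int)) :=
    PySem.Dict.ofList (pvNumbers.map (fun p => (p.1, [])))
  let d :=
    (PySem.List.pyRange 0 (PySem.Str.len line) 1).foldl
      (fun d i =>
        pvNumbers.foldl
          (fun d p =>
            if PySem.Chars.startswith (s.drop i.toNat) p.1 then
              d.modify p.1 [] (· ++ [(i, (p.1.length : Int), p.2)])
            else d)
          d)
      d0
  pvNumbers.flatMap (fun p => d.getD p.1 [])

-- ===== PRECONDITION & SPEC =====
def Spec_find_text_numbers (line : String) (out : List (Int × Int × Int)) : Prop := out = find_text_numbers_alt line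
instance (line : String) (out : List (Int × Int × Int)) : Decidable (Spec_find_text_numbers line out) := by unfold Spec_find_text_numbers; infer_instance

-- ===== CLAIM (what is proved, stated in full; the proofs are below) =====
def Claim_equal_find_text_numbers : Prop := ∀ (line : String), Dom_find_text_numbers line → Spec_find_text_numbers line (find_text_numbers line)

-- ===== LEMMAS AND PROOFS =====

-- the matches of word w in s, in increasing position order, as B's position filter produces them
def pvMatches (s w : List Char) (v : Int) : List (Int × Int × Int) :=
  ((List.range s.length).filter (fun i => PySem.Chars.startswith (s.drop i) w)).map
    (fun i : Nat => ((i : Int), (w.length : Int), v))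

lemma pv_filter_range_first (P : Nat → Bool) (n k m : Nat) (hm : m < n) (hkm : k ≤ m)
    (hPm : P m = true) (hnone : ∀ i, k ≤ i → i < m → P i = false) :
    (List.range n).filter (fun i => decide (k ≤ i) && P i)
      = m :: (List.range n).filter (fun i => decide (m + 1 ≤ i) && P i) := by
  induction n with
  | zero => omega
  | succ n ih =>
    rw [List.range_succ, List.filter_append, List.filter_append]
    by_cases h : m < n
    · rw [ih h]
      have : (List.filter (fun i => decide (k ≤ i) && P i) [n])
           = (List.filter (fun i => decide (m + 1 ≤ i) && P i) [n]) := by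
        simp only [List.filter_singleton]
        have hk : decide (k ≤ n) = true := by simp; omega
        have hm1 : decide (m + 1 ≤ n) = true := by simp; omega
        rw [hk, hm1]
      rw [this]; simp
    · have hmn : m = n := by omega
      subst hmn
      have h1 : List.filter (fun i => decide (k ≤ i) && P i) (List.range m) = [] := by
        rw [List.filter_eq_nil_iff]
        intro i hi
        simp only [List.mem_range] at hi
        by_cases hki : k ≤ i
        · simp [hnone i hki hi]
        · simp [hki]
      have h2 : List.filter (fun i => decide (m + 1 ≤ i) && P i) (List.range m) = [] := by
        rw [List.filter_eq_nil_iff]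
        intro i hi
        simp only [List.mem_range] at hi
        have : ¬ (m + 1 ≤ i) := by omega
        simp [this]
      rw [h1, h2]
      simp [hPm, hkm]

lemma pvLoopA_spec (s w : List Char) (v : Int) (hw : w ≠ []) :
    ∀ fuel (k : Nat), k ≤ s.length → s.length + 1 - k ≤ fuel →
    pvLoopA s w v fuel (PySem.Chars.findFrom s w (k : Int))
      = ((List.range s.length).filter
          (fun i => decide (k ≤ i) && PySem.Chars.startswith (s.drop i) w)).map
          (fun i : Nat => ((i : Int), (w.length : Int), v)) := by
  intro fuel
  induction fuel with
  | zero => intro k hk hf; omega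
  | succ fuel ih =>
    intro k hk _hf
    set m : Int := PySem.Chars.findFrom s w (k : Int) with hmdef
    clear_value m
    by_cases hneg : m = -1
    · -- no more matches at or after k
      have hninf : ¬ w <:+: List.drop k s :=
        (PySem.Chars.findFrom_natCast_eq_neg_one_iff s w k hk).mp (hmdef ▸ hneg)
      have hfilter : (List.range s.length).filter
          (fun i => decide (k ≤ i) && PySem.Chars.startswith (s.drop i) w) = [] := by
        rw [List.filter_eq_nil_iff]
        intro i _hi
        by_cases hki : k ≤ i
        · have : PySem.Chars.startswith (s.drop i) w = false := by
            by_contra hsw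
            have hsw' : PySem.Chars.startswith (s.drop i) w = true := by
              revert hsw; cases PySem.Chars.startswith (s.drop i) w <;> simp
            have hp : w <+: List.drop i s := (PySem.Chars.startswith_iff _ _).mp hsw'
            have hdd : List.drop (i - k) (List.drop k s) = List.drop i s := by
              rw [List.drop_drop]; congr 1; omega
            have : w <:+: List.drop k s := by
              have hisin : PySem.Chars.isIn w (List.drop k s) = true :=
                (PySem.Chars.exists_prefix_drop_iff_isIn w (List.drop k s)).mp
                  ⟨i - k, by rw [hdd]; exact hp⟩
              exact (PySem.Chars.isIn_iff_infix _ _).mp hisin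
            exact hninf this
          simp [this]
        · simp [hki]
      rw [hfilter]
      simp [pvLoopA, hneg]
    · -- a match at m = the first position ≥ k where w occurs
      obtain ⟨hkm, hpre, hmin⟩ := PySem.Chars.findFrom_natCast_spec s w k hk (hmdef ▸ hneg)
      rw [← hmdef] at hkm hpre hmin
      have hm0 : 0 ≤ m := by omega
      have hmlt : m.toNat < s.length := by
        have hne : List.drop m.toNat s ≠ [] := by
          intro hnil
          rw [hnil] at hpre
          exact hw (List.prefix_nil.mp hpre)
        have := List.drop_eq_nil_iff.not.mp (by exact hne)
        omega
      have hkm' : k ≤ m.toNat := by omega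
      have hPm : PySem.Chars.startswith (List.drop m.toNat s) w = true :=
        (PySem.Chars.startswith_iff _ _).mpr hpre
      have hnone : ∀ i, k ≤ i → i < m.toNat →
          PySem.Chars.startswith (List.drop i s) w = false := by
        intro i h1 h2
        have := hmin i h1 h2
        by_contra hsw
        have hsw' : PySem.Chars.startswith (s.drop i) w = true := by
          revert hsw; cases PySem.Chars.startswith (s.drop i) w <;> simp
        exact this ((PySem.Chars.startswith_iff _ _).mp hsw')
      rw [pv_filter_range_first _ _ k m.toNat hmlt hkm' hPm hnone]
      have hcast : m + 1 = ((m.toNat + 1 : Nat) : Int) := by omega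
      have h1 : m.toNat + 1 ≤ s.length := by omega
      have h2 : s.length + 1 - (m.toNat + 1) ≤ fuel := by omega
      have hrec := ih (m.toNat + 1) h1 h2
      simp only [pvLoopA, hm0, if_true]
      rw [hcast, hrec, List.map_cons]
      congr 2
      omega

lemma pvLoopA_full (s w : List Char) (v : Int) (hw : w ≠ []) :
    pvLoopA s w v (s.length + 1) (PySem.Chars.find s w) = pvMatches s w v := by
  have h := pvLoopA_spec s w v hw (s.length + 1) 0 (by omega) (by omega)
  rw [show ((0 : Nat) : Int) = 0 by rfl, PySem.Chars.findFrom_zero] at h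
  rw [h]
  unfold pvMatches
  simp

-- the inner fold over the words leaves key w0 alone when w0 is not among the keys
lemma pv_inner_getD_notmem (s : List Char) (i : Int) (ws : List (List Char × Int))
    (d : PySem.Dict (List Char) (List (Int × Int × Int))) (w0 : List Char)
    (h : w0 ∉ ws.map Prod.fst) :
    (ws.foldl
      (fun d p =>
        if PySem.Chars.startswith (s.drop i.toNat) p.1 then
          d.modify p.1 [] (· ++ [(i, (p.1.length : Int), p.2)])
        else d)
      d).getD w0 [] = d.getD w0 [] := by
  induction ws generalizing d with
  | nil => rfl
  | cons p t ih =>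
    simp only [List.map_cons, List.mem_cons, not_or] at h
    rw [List.foldl_cons, ih _ h.2]
    by_cases hs : PySem.Chars.startswith (s.drop i.toNat) p.1
    · rw [if_pos hs, PySem.Dict.getD_modify_of_ne _ _ _ h.1]
    · rw [if_neg hs]

-- one position i: the bucket of w0 gains exactly one tuple when w0 matches at i
lemma pv_inner_getD (s : List Char) (i : Int) (ws : List (List Char × Int))
    (d : PySem.Dict (List Char) (List (Int × Int × Int))) (w0 : List Char) (v0 : Int)
    (hmem : (w0, v0) ∈ ws) (hnd : (ws.map Prod.fst).Nodup) :
    (ws.foldl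
      (fun d p =>
        if PySem.Chars.startswith (s.drop i.toNat) p.1 then
          d.modify p.1 [] (· ++ [(i, (p.1.length : Int), p.2)])
        else d)
      d).getD w0 []
    = if PySem.Chars.startswith (s.drop i.toNat) w0 then
        d.getD w0 [] ++ [(i, (w0.length : Int), v0)]
      else d.getD w0 [] := by
  induction ws generalizing d with
  | nil => simp at hmem
  | cons p t ih =>
    simp only [List.map_cons, List.nodup_cons] at hnd
    rcases List.mem_cons.mp hmem with hp | ht
    · subst hp
      have hnot : w0 ∉ t.map Prod.fst := hnd.1
      rw [List.foldl_cons, pv_inner_getD_notmem s i t _ w0 hnot]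
      by_cases hs : PySem.Chars.startswith (s.drop i.toNat) w0
      · rw [if_pos hs, if_pos hs, PySem.Dict.getD_modify_self]
      · rw [if_neg hs, if_neg hs]
    · have hne : w0 ≠ p.1 := by
        intro he
        exact hnd.1 (he ▸ (List.mem_map.mpr ⟨(w0, v0), ht, by rw [he]⟩))
      rw [List.foldl_cons]
      rw [ih _ ht hnd.2]
      by_cases hs : PySem.Chars.startswith (s.drop i.toNat) p.1
      · rw [if_pos hs, PySem.Dict.getD_modify_of_ne _ _ _ hne]
      · rw [if_neg hs]

-- the position scan: the final bucket of w0 is its filter over the scanned positions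
lemma pv_outer_getD (s : List Char) (w0 : List Char) (v0 : Int)
    (hmem : (w0, v0) ∈ pvNumbers) :
    ∀ (ns : List Nat) (d : PySem.Dict (List Char) (List (Int × Int × Int))),
    ((ns.map (fun k : Nat => (k : Int))).foldl
      (fun d i =>
        pvNumbers.foldl
          (fun d p =>
            if PySem.Chars.startswith (s.drop i.toNat) p.1 then
              d.modify p.1 [] (· ++ [(i, (p.1.length : Int), p.2)])
            else d)
          d)
      d).getD w0 []
    = d.getD w0 []
      ++ ((ns.filter (fun i => PySem.Chars.startswith (s.drop i) w0)).map
          (fun i : Nat => ((i : Int), (w0.length : Int), v0))) := by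
  have hnd : (pvNumbers.map Prod.fst).Nodup := by decide
  intro ns
  induction ns with
  | nil => intro d; simp
  | cons j t ih =>
    intro d
    rw [List.map_cons, List.foldl_cons, ih]
    rw [pv_inner_getD s (j : Int) pvNumbers d w0 v0 hmem hnd]
    have htn : ((j : Int)).toNat = j := by omega
    rw [htn]
    by_cases hs : PySem.Chars.startswith (s.drop j) w0
    · rw [if_pos hs]
      simp [hs, List.append_assoc]
    · rw [if_neg hs]
      simp [hs]

lemma pv_alt_eq (line : String) :
    find_text_numbers_alt line = pvNumbers.flatMap (fun p => pvMatches line.toList p.1 p.2) := by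
  unfold find_text_numbers_alt
  apply List.flatMap_congr
  intro p hp
  have hlen : PySem.Str.len line = ((line.toList.length : Nat) : Int) := by
    simp [PySem.Str.len_eq]
  rw [hlen, PySem.List.pyRange_zero_nat]
  have hp' : (p.1, p.2) ∈ pvNumbers := by rwa [Prod.mk.eta]
  rw [pv_outer_getD line.toList p.1 p.2 hp' (List.range line.toList.length) _]
  have h0 : (PySem.Dict.ofList (pvNumbers.map (fun p => (p.1, ([] : List (Int × Int × Int)))))).getD p.1 [] = [] := by
    fin_cases hp <;> rfl
  rw [h0, List.nil_append]
  rfl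

-- ===== VERDICT (by name: the statement is the Claim_ definition above) =====
theorem find_text_numbers_spec : Claim_equal_find_text_numbers := by
  intro line _
  unfold Spec_find_text_numbers
  rw [pv_alt_eq]
  unfold find_text_numbers
  rw [PySem.List.foldl_append_eq_flatMap, List.nil_append]
  apply List.flatMap_congr
  intro p hp
  have hw : p.1 ≠ [] := by fin_cases hp <;> decide
  exact pvLoopA_full line.toList p.1 p.2 hw
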